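-- pv_equiv track=rewrite | github.com/Dawacode/RAG_System | scraper/cleanup_md.py | remove_section
-- ===== SOURCE A (Python) =====
-- def remove_section(lines, section, from_start=True):
--     n = len(section)
--     if from_start:
--         for i in range(len(lines)):
--             if lines[i:i+n] == section:
--                 return [line.strip('\u200c\u2060') for line in lines[i+n:] if line.strip()]
--         return [line.strip('\u200c\u2060') for line in lines if line.strip()]
--     else:
--         for i in range(len(lines)-n, -1, -1):
--             if lines[i:i+n] == section:
--                 return [line.strip('\u200c\u2060') for line in lines[:i] if line.strip()]
--         return [line.strip('\u200c\u2060') for line in lines if line.strip()]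
-- ===== SOURCE B (Python) =====
-- def _tail_after(ls, sec):
--     """Remainder of ls after the first occurrence of sec, or None if absent."""
--     n = len(sec)
--     rest = ls
--     while rest:
--         if rest[:n] == sec:
--             return rest[n:]
--         rest = rest[1:]
--     return None
--
-- def remove_section(lines, section, from_start=True):
--     if from_start:
--         t = _tail_after(lines, section)
--         kept = lines if t is None else t
--     else:
--         # last occurrence = first occurrence in the reversed list
--         t = _tail_after(lines[::-1], section[::-1])
--         kept = lines if t is None else t[::-1]
--     return [l.strip('\u200c\u2060') for l in kept if l.strip()]
-- ===== Notes on version B (the rewrite author's own statement) =====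
-- stated objective: alternative
-- what changed: Replaces A's two index-and-slice for-loops (a forward range scan and a separate backward range scan) by one structural suffix recursion that returns the remainder after the first occurrence, reused for the last occurrence by reversing both lists; not faster (the suffix copying makes B slower on large inputs).
import Mathlib
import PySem

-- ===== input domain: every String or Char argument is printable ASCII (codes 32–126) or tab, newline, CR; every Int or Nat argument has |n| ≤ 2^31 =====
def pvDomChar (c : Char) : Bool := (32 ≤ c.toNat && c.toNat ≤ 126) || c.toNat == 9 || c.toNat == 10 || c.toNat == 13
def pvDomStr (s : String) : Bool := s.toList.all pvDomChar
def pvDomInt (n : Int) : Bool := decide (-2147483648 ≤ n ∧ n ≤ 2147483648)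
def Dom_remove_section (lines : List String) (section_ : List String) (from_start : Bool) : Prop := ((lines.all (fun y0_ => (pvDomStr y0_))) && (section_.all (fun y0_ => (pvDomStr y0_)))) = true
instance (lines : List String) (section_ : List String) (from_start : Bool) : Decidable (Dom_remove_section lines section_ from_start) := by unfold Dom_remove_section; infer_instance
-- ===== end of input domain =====

-- B replaces A's two directional index/slice scans by one structural suffix recursion
-- (reused via list reversal for the last-occurrence case); objective: alternative decomposition, not faster.

-- ===== PORT A =====
-- shared by both ports: the comprehension [l.strip('\u200c\u2060') for l in ls if l.strip()]
def pvClean (ls : List String) : List String :=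
  ls.filterMap (fun l =>
    if PySem.Str.strip l ≠ "" then some (PySem.Str.stripChars l "\u200C\u2060") else none)

-- A's forward for-loop: first i < len(lines) with lines[i:i+n] == section
-- (both slice indices are nonnegative, so lines[i:i+n] is exactly take n (drop i lines))
def pvScanFwd (lines sec : List String) (n i : Nat) : Option Nat :=
  if _h : i < lines.length then
    if (lines.drop i).take n = sec then some i
    else pvScanFwd lines sec n (i + 1)
  else none
termination_by lines.length - i

-- A's backward for-loop: i runs len-n, len-n-1, …, 0 (range(len-n,-1,-1); empty when n > len,
-- which the caller checks)
def pvScanBwd (lines sec : List String) (n : Nat) : Nat → Option Nat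
  | 0 => if (lines.drop 0).take n = sec then some 0 else none
  | i + 1 => if (lines.drop (i + 1)).take n = sec then some (i + 1) else pvScanBwd lines sec n i

def remove_section (lines : List String) (section_ : List String) (from_start : Bool) : List String :=
  let n := section_.length
  if from_start then
    match pvScanFwd lines section_ n 0 with
    | some i => pvClean (lines.drop (i + n))
    | none => pvClean lines
  else
    match (if n ≤ lines.length then pvScanBwd lines section_ n (lines.length - n) else none) with
    | some i => pvClean (lines.take i)
    | none => pvClean lines

-- ===== PORT B =====
-- _tail_after: remainder of the list after the first occurrence of sec, none if absent
def pvTailAfter (sec : List String) : List String → Option (List String)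
  | [] => none
  | l :: rest =>
    if sec.isPrefixOf (l :: rest) then some ((l :: rest).drop sec.length)
    else pvTailAfter sec rest

def remove_section_alt (lines : List String) (section_ : List String) (from_start : Bool) : List String :=
  let kept :=
    if from_start then
      match pvTailAfter section_ lines with
      | none => lines
      | some t => t
    else
      match pvTailAfter section_.reverse lines.reverse with
      | none => lines
      | some t => t.reverse
  pvClean kept

-- ===== PRECONDITION & SPEC =====
def Spec_remove_section (lines : List String) (section_ : List String) (from_start : Bool) (out : List String) : Prop := out = remove_section_alt lines section_ from_start
instance (lines : List String) (section_ : List String) (from_start : Bool) (out : List String) : Decidable (Spec_remove_section lines section_ from_start out) := by unfold Spec_remove_section; infer_instance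

-- ===== CLAIM (what is proved, stated in full; the proofs are below) =====
def Claim_equal_remove_section : Prop := ∀ (lines : List String) (section_ : List String) (from_start : Bool), Dom_remove_section lines section_ from_start → Spec_remove_section lines section_ from_start (remove_section lines section_ from_start)

-- ===== LEMMAS AND PROOFS =====

theorem pv_isPrefixOf_eq_take (sec xs : List String) :
    sec.isPrefixOf xs = true ↔ xs.take sec.length = sec := by
  rw [List.isPrefixOf_iff_prefix, List.prefix_iff_eq_take]
  exact ⟨fun h => h.symm, fun h => h.symm⟩

theorem pvTailAfter_none_of_lt {sec : List String} {ls : List String}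
    (h : ls.length < sec.length) : pvTailAfter sec ls = none := by
  induction ls with
  | nil => rfl
  | cons l rest ih =>
    rw [pvTailAfter]
    have hp : ¬ sec.isPrefixOf (l :: rest) = true := by
      intro hpre
      have hle := (List.isPrefixOf_iff_prefix.mp hpre).length_le
      simp only [List.length_cons] at hle h
      omega
    rw [if_neg hp]
    exact ih (by simp only [List.length_cons] at h; omega)

theorem pvScanFwd_eq_tailAfter (lines sec : List String) (i : Nat) :
    Option.map (fun j => lines.drop (j + sec.length)) (pvScanFwd lines sec sec.length i)
      = pvTailAfter sec (lines.drop i) := by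
  rw [pvScanFwd]
  by_cases h : i < lines.length
  · rw [dif_pos h]
    have hne : lines.drop i ≠ [] := by
      intro hnil
      have := List.drop_eq_nil_iff.mp hnil
      omega
    obtain ⟨l, rest, hd⟩ := List.exists_cons_of_ne_nil hne
    rw [hd, pvTailAfter]
    by_cases hc : (l :: rest).take sec.length = sec
    · rw [if_pos hc]
      have hpre : sec.isPrefixOf (l :: rest) = true :=
        (pv_isPrefixOf_eq_take sec _).mpr hc
      rw [if_pos hpre, ← hd]
      simp [List.drop_drop]
    · rw [if_neg hc]
      have hpre : ¬ sec.isPrefixOf (l :: rest) = true :=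
        fun hp => hc ((pv_isPrefixOf_eq_take sec _).mp hp)
      rw [if_neg hpre]
      have ht : lines.drop (i + 1) = rest := by
        have h1 : (lines.drop i).drop 1 = rest := by rw [hd]; rfl
        rw [← h1, List.drop_drop]
      rw [← ht]
      exact pvScanFwd_eq_tailAfter lines sec (i + 1)
  · rw [dif_neg h]
    rw [List.drop_eq_nil_of_le (by omega)]
    rfl
termination_by lines.length - i

theorem pv_rev_drop (lines sec : List String) (i : Nat) (h : i + sec.length ≤ lines.length) :
    lines.reverse.drop (lines.length - sec.length - i) = (lines.take (i + sec.length)).reverse := by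
  rw [List.drop_reverse]
  have he : lines.length - (lines.length - sec.length - i) = i + sec.length := by omega
  rw [he]

theorem pv_bwd_cond (lines sec : List String) (i : Nat) (h : i + sec.length ≤ lines.length) :
    (sec.reverse.isPrefixOf (lines.reverse.drop (lines.length - sec.length - i)) = true)
      ↔ (lines.drop i).take sec.length = sec := by
  rw [pv_rev_drop lines sec i h, List.isPrefixOf_iff_prefix, List.reverse_prefix,
    List.suffix_iff_eq_drop, List.length_take]
  have he : min (i + sec.length) lines.length - sec.length = i := by omega
  rw [he, List.drop_take]
  have he2 : i + sec.length - i = sec.length := by omega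
  rw [he2]
  exact ⟨fun hh => hh.symm, fun hh => hh.symm⟩

theorem pv_bwd_val (lines sec : List String) (i : Nat) (h : i + sec.length ≤ lines.length) :
    ((lines.reverse.drop (lines.length - sec.length - i)).drop sec.length).reverse
      = lines.take i := by
  rw [pv_rev_drop lines sec i h, List.drop_reverse, List.reverse_reverse, List.length_take]
  have he : min (i + sec.length) lines.length - sec.length = i := by omega
  rw [he, List.take_take]
  have he2 : min i (i + sec.length) = i := by omega
  rw [he2]

theorem pvScanBwd_eq_tailAfter (lines sec : List String) (hsec : sec ≠ []) :
    ∀ i, i + sec.length ≤ lines.length →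
    Option.map (fun j => lines.take j) (pvScanBwd lines sec sec.length i)
      = Option.map (fun t : List String => t.reverse)
          (pvTailAfter sec.reverse (lines.reverse.drop (lines.length - sec.length - i))) := by
  have hn1 : 1 ≤ sec.length := by
    cases sec with
    | nil => exact absurd rfl hsec
    | cons a b => simp
  intro i
  induction i with
  | zero =>
    intro h
    have hlen : (lines.reverse.drop (lines.length - sec.length - 0)).length
        = sec.length + 0 := by
      rw [List.length_drop, List.length_reverse]; omega
    have hne : lines.reverse.drop (lines.length - sec.length - 0) ≠ [] := by
      intro hnil; rw [hnil] at hlen; simp at hlen; omega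
    obtain ⟨l, rest, hcons⟩ := List.exists_cons_of_ne_nil hne
    have hcond : (sec.reverse.isPrefixOf (l :: rest) = true)
        ↔ (lines.drop 0).take sec.length = sec := by
      rw [← hcons]; exact pv_bwd_cond lines sec 0 h
    rw [pvScanBwd, hcons, pvTailAfter]
    by_cases hc : (lines.drop 0).take sec.length = sec
    · rw [if_pos hc, if_pos (hcond.mpr hc)]
      have hv := pv_bwd_val lines sec 0 h
      rw [hcons] at hv
      simp only [Option.map_some]
      rw [List.length_reverse, ← hv]
    · rw [if_neg hc, if_neg (fun hp => hc (hcond.mp hp))]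
      have hrest : pvTailAfter sec.reverse rest = none := by
        apply pvTailAfter_none_of_lt
        have : (l :: rest).length = sec.length + 0 := by rw [← hcons]; exact hlen
        simp only [List.length_cons] at this
        rw [List.length_reverse]
        omega
      rw [hrest]
      rfl
  | succ i' ih =>
    intro h
    have hlen : (lines.reverse.drop (lines.length - sec.length - (i' + 1))).length
        = sec.length + (i' + 1) := by
      rw [List.length_drop, List.length_reverse]; omega
    have hne : lines.reverse.drop (lines.length - sec.length - (i' + 1)) ≠ [] := by
      intro hnil; rw [hnil] at hlen; simp at hlen
    obtain ⟨l, rest, hcons⟩ := List.exists_cons_of_ne_nil hne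
    have hcond : (sec.reverse.isPrefixOf (l :: rest) = true)
        ↔ (lines.drop (i' + 1)).take sec.length = sec := by
      rw [← hcons]; exact pv_bwd_cond lines sec (i' + 1) h
    rw [pvScanBwd, hcons, pvTailAfter]
    by_cases hc : (lines.drop (i' + 1)).take sec.length = sec
    · rw [if_pos hc, if_pos (hcond.mpr hc)]
      have hv := pv_bwd_val lines sec (i' + 1) h
      rw [hcons] at hv
      simp only [Option.map_some]
      rw [List.length_reverse, ← hv]
    · rw [if_neg hc, if_neg (fun hp => hc (hcond.mp hp))]
      have hrest : rest = lines.reverse.drop (lines.length - sec.length - i') := by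
        have h1 : (lines.reverse.drop (lines.length - sec.length - (i' + 1))).drop 1 = rest := by
          rw [hcons]; rfl
        rw [← h1, List.drop_drop]
        have he : lines.length - sec.length - (i' + 1) + 1 = lines.length - sec.length - i' := by
          omega
        rw [he]
      rw [hrest]
      exact ih (by omega)

theorem pvScanBwd_nil (lines : List String) : ∀ m, pvScanBwd lines [] 0 m = some m := by
  intro m
  cases m <;> simp [pvScanBwd]

-- ===== VERDICT (by name: the statement is the Claim_ definition above) =====
theorem remove_section_spec : Claim_equal_remove_section := by
  intro lines sec fs _
  unfold Spec_remove_section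
  cases fs with
  | true =>
    have h0 := pvScanFwd_eq_tailAfter lines sec 0
    rw [List.drop_zero] at h0
    cases hs : pvScanFwd lines sec sec.length 0 with
    | none =>
      rw [hs] at h0
      simp only [Option.map_none] at h0
      simp [remove_section, remove_section_alt, hs, ← h0]
    | some j =>
      rw [hs] at h0
      simp only [Option.map_some] at h0
      simp [remove_section, remove_section_alt, hs, ← h0]
  | false =>
    by_cases hsec : sec = []
    · subst hsec
      cases hr : lines.reverse with
      | nil =>
        have hl : lines = [] := List.reverse_eq_nil_iff.mp hr
        subst hl
        simp [remove_section, remove_section_alt, pvScanBwd, pvTailAfter]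
      | cons a b =>
        have hA : pvScanBwd lines [] 0 lines.length = some lines.length :=
          pvScanBwd_nil lines _
        have hB : pvTailAfter ([] : List String) lines.reverse
            = some (lines.reverse) := by
          rw [hr, pvTailAfter]
          simp
        simp [remove_section, remove_section_alt, hA, hB, List.take_length,
          List.reverse_reverse]
    · by_cases hnL : sec.length ≤ lines.length
      · have h0 := pvScanBwd_eq_tailAfter lines sec hsec (lines.length - sec.length) (by omega)
        have he : lines.length - sec.length - (lines.length - sec.length) = 0 := by omega
        rw [he, List.drop_zero] at h0
        cases hs : pvScanBwd lines sec sec.length (lines.length - sec.length) with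
        | none =>
          rw [hs] at h0
          simp only [Option.map_none] at h0
          cases ht : pvTailAfter sec.reverse lines.reverse with
          | none => simp [remove_section, remove_section_alt, hs, ht, hnL]
          | some t => rw [ht] at h0; simp at h0
        | some j =>
          rw [hs] at h0
          simp only [Option.map_some] at h0
          cases ht : pvTailAfter sec.reverse lines.reverse with
          | none => rw [ht] at h0; simp at h0
          | some t =>
            rw [ht] at h0
            simp only [Option.map_some, Option.some.injEq] at h0
            simp [remove_section, remove_section_alt, hs, ht, hnL, h0]
      · have hB : pvTailAfter sec.reverse lines.reverse = none := by
          apply pvTailAfter_none_of_lt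
          rw [List.length_reverse, List.length_reverse]
          omega
        simp [remove_section, remove_section_alt, hB, hnL]
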